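-- pv_equiv track=rewrite | github.com/AtosiDas/InterviewBit_Question_Solve_300- | Arrays/Greater_than_all.py | solve
-- ===== SOURCE A (Python) =====
-- def solve(A):
--     count = 0
--     max_so_far = float('-inf')
--     for a in A:
--         if a > max_so_far:
--             count += 1
--             max_so_far = a
--     return count
-- ===== SOURCE B (Python) =====
-- def solve(A):
--     # Pass 1: build the running-maximum sequence; Pass 2: count its distinct values.
--     best = []
--     for a in A:
--         best.append(a if not best or a > best[-1] else best[-1])
--     return len(set(best))
-- ===== Notes on version B (the rewrite author's own statement) =====
-- stated objective: alternative
-- what changed: B builds the running-maximum sequence in one pass and then returns the number of its distinct values, instead of A's fused count+max accumulator loop.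
import Mathlib
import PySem

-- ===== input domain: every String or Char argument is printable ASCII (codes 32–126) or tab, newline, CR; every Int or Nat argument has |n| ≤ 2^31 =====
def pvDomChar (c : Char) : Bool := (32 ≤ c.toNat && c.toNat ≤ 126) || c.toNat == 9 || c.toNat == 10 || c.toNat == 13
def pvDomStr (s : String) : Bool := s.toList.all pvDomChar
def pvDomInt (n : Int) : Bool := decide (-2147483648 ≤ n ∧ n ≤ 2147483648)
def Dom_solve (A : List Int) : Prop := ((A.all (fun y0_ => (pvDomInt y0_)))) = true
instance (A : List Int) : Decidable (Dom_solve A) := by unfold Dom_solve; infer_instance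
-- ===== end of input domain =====

-- B builds the running-maximum sequence and counts its distinct values, instead of A's fused count+max loop; alternative decomposition, return value only.

-- ===== PORT A =====
-- the for-loop of A as structural recursion; max_so_far = none models the float('-inf') seed
def solveGo : List Int → Int → Option Int → Int
  | [], count, _ => count
  | a :: t, count, none => solveGo t (count + 1) (some a)
  | a :: t, count, some m =>
      if a > m then solveGo t (count + 1) (some a) else solveGo t count (some m)

def solve (A : List Int) : Int := solveGo A 0 none

-- ===== PORT B =====
-- pass 1 of B: build the running-maximum list (best.append(a if not best or a > best[-1] else best[-1]))
def altGo : List Int → List Int → List Int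
  | [], best => best
  | a :: t, best =>
      match best.getLast? with
      | none => altGo t (best ++ [a])
      | some m => altGo t (best ++ [if a > m then a else m])

-- pass 2 of B: len(set(best))
def solve_alt (A : List Int) : Int := ((PySem.Set.ofList (altGo A [])).length : Int)

-- ===== PRECONDITION & SPEC =====
def Spec_solve (A : List Int) (out : Int) : Prop := out = solve_alt A
instance (A : List Int) (out : Int) : Decidable (Spec_solve A out) := by unfold Spec_solve; infer_instance

-- ===== CLAIM (what is proved, stated in full; the proofs are below) =====
def Claim_equal_solve : Prop := ∀ (A : List Int), Dom_solve A → Spec_solve A (solve A)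

-- ===== LEMMAS AND PROOFS =====

lemma key : ∀ (t best : List Int) (m : Int),
    best.getLast? = some m → (∀ x ∈ best, x ≤ m) →
    solveGo t ((PySem.Set.ofList best).length : Int) (some m)
      = ((PySem.Set.ofList (altGo t best)).length : Int) := by
  intro t
  induction t with
  | nil => intro best m _ _; simp [solveGo, altGo]
  | cons a t ih =>
    intro best m hlast hle
    have hm_mem : m ∈ best := List.mem_of_getLast? hlast
    simp only [solveGo, altGo, hlast]
    by_cases hgt : a > m
    · simp only [if_pos hgt]
      have hnot : a ∉ best := fun hmem => absurd (hle a hmem) (by omega)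
      have hofl : PySem.Set.ofList (best ++ [a]) = PySem.Set.ofList best ++ [a] := by
        rw [PySem.Set.ofList_append_singleton, PySem.Set.add_of_not_mem]
        simpa [PySem.Set.mem_ofList] using hnot
      have hcast : ((PySem.Set.ofList best).length : Int) + 1
          = ((PySem.Set.ofList (best ++ [a])).length : Int) := by
        rw [hofl]; simp
      rw [hcast, ih (best ++ [a]) a (by simp) ?_]
      intro x hx
      rcases List.mem_append.mp hx with h | h
      · have := hle x h; omega
      · simp at h; omega
    · simp only [if_neg hgt]
      have hofl : PySem.Set.ofList (best ++ [m]) = PySem.Set.ofList best := by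
        rw [PySem.Set.ofList_append_singleton, PySem.Set.add_of_mem]
        simpa [PySem.Set.mem_ofList] using hm_mem
      rw [show ((PySem.Set.ofList best).length : Int)
          = ((PySem.Set.ofList (best ++ [m])).length : Int) by rw [hofl]]
      rw [ih (best ++ [m]) m (by simp) ?_]
      intro x hx
      rcases List.mem_append.mp hx with h | h
      · exact hle x h
      · simp at h; omega

-- ===== VERDICT (by name: the statement is the Claim_ definition above) =====
theorem solve_spec : Claim_equal_solve := by
  intro A _
  unfold Spec_solve solve solve_alt
  cases A with
  | nil => simp [solveGo, altGo]
  | cons a t =>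
    simp only [solveGo, altGo, List.getLast?_nil, List.nil_append]
    have h := key t [a] a (by simp) (by intro x hx; simp at hx; omega)
    simpa [PySem.Set.ofList] using h
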